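-- pv_equiv track=rewrite | github.com/hareshaprajapati/langgraph-agentic-ai | Single_V2_0/Siko_Tue_single_3_hit_readonly.py | _hit_summary
-- ===== SOURCE A (Python) =====
-- from typing import List, Dict, Tuple, Optional, Callable
--
-- def _hit_summary(real_draw: List[int], tickets: List[List[int]]) -> Dict[str, int]:
--     rd_set = set(real_draw)
--     counts = {0: 0, 1: 0, 2: 0, 3: 0, 4: 0, 5: 0, 6: 0}
--     total_hits = 0
--     for t in tickets:
--         hit_n = len(set(t).intersection(rd_set))
--         counts[hit_n] = counts.get(hit_n, 0) + 1
--         total_hits += hit_n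
--     return {
--         "ge3": sum(counts[h] for h in counts if h >= 3),
--         "ge4": sum(counts[h] for h in counts if h >= 4),
--         "ge5": sum(counts[h] for h in counts if h >= 5),
--         "ge2": sum(counts[h] for h in counts if h >= 2),
--         "total_hits": total_hits,
--     }
-- ===== SOURCE B (Python) =====
-- from typing import List, Dict
--
-- def _hit_summary(real_draw: List[int], tickets: List[List[int]]) -> Dict[str, int]:
--     rd_set = set(real_draw)
--     hits = sorted(len({x for x in t if x in rd_set}) for t in tickets)
--     n = len(hits)
--
--     def at_least(k):
--         # lower-bound binary search in the sorted hit list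
--         lo, hi = 0, n
--         while lo < hi:
--             mid = (lo + hi) // 2
--             if hits[mid] < k:
--                 lo = mid + 1
--             else:
--                 hi = mid
--         return n - lo
--
--     return {"ge3": at_least(3), "ge4": at_least(4), "ge5": at_least(5),
--             "ge2": at_least(2), "total_hits": sum(hits)}
-- ===== Notes on version B (the rewrite author's own statement) =====
-- stated objective: alternative
-- what changed: B replaces A's per-ticket histogram dict and its four threshold-summing passes by a sort-then-search scheme: it sorts the list of per-ticket hit counts and obtains each ge_k as length minus a lower-bound binary search, and total_hits as the sum of that list.
import Mathlib
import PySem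

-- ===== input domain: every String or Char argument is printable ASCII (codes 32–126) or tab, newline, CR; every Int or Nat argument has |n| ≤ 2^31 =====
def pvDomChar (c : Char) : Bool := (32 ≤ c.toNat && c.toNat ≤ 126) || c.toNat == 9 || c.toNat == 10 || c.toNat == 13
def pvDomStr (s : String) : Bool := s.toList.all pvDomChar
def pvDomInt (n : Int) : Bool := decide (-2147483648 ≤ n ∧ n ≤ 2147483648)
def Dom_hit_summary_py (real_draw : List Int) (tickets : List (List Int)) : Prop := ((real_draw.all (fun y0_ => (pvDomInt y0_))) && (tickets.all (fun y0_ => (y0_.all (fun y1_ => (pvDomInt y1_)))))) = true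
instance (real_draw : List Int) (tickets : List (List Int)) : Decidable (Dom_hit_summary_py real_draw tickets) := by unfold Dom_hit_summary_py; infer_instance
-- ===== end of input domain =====

-- B replaces A's histogram dict and its threshold-summing passes by a different algorithm:
-- sort the per-ticket hit counts, read each "ge k" off the sorted list by lower-bound binary
-- search, and sum the list for total_hits (objective: alternative).

-- ===== PORT A =====
-- hit_n = len(set(t).intersection(rd_set))
def pvHit (rd : PySem.Set Int) (t : List Int) : Int :=
  PySem.Set.len (PySem.Set.inter (PySem.Set.ofList t) rd)

def hit_summary_py (real_draw : List Int) (tickets : List (List Int)) : List (String × Int) :=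
  let rd_set : PySem.Set Int := PySem.Set.ofList real_draw
  let counts0 : PySem.Dict Int Int := PySem.Dict.ofList [(0,0),(1,0),(2,0),(3,0),(4,0),(5,0),(6,0)]
  let st := tickets.foldl (fun (p : PySem.Dict Int Int × Int) t =>
      (p.1.insert (pvHit rd_set t) (p.1.getD (pvHit rd_set t) 0 + 1), p.2 + pvHit rd_set t)) (counts0, 0)
  let counts := st.1
  [("ge3", ((counts.items.filter (fun kv => 3 ≤ kv.1)).map (·.2)).sum),
   ("ge4", ((counts.items.filter (fun kv => 4 ≤ kv.1)).map (·.2)).sum),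
   ("ge5", ((counts.items.filter (fun kv => 5 ≤ kv.1)).map (·.2)).sum),
   ("ge2", ((counts.items.filter (fun kv => 2 ≤ kv.1)).map (·.2)).sum),
   ("total_hits", st.2)]

-- ===== PORT B =====
-- hit count of B: len({x for x in t if x in rd_set})
def pvHitB (rd : PySem.Set Int) (t : List Int) : Int :=
  PySem.Set.len (PySem.Set.ofList (t.filter (fun x => PySem.Set.contains rd x)))

-- Source B's hand-written lower-bound while loop (lo, hi; mid = (lo+hi)//2), step for step, with
-- fuel = initial length as the loop's termination measure; the `none` branch is a totality
-- guard only (the loop keeps lo < hi ≤ length, so hits[mid] never raises in Python).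
def pvSearch (hits : List Int) (k : Int) (fuel lo hi : Nat) : Nat :=
  match fuel with
  | 0 => lo
  | fuel + 1 =>
    if lo < hi then
      match hits[(lo + hi) / 2]? with
      | some y => if y < k then pvSearch hits k fuel ((lo + hi) / 2 + 1) hi
                  else pvSearch hits k fuel lo ((lo + hi) / 2)
      | none => lo
    else lo

def hit_summary_py_alt (real_draw : List Int) (tickets : List (List Int)) : List (String × Int) :=
  let rd_set : PySem.Set Int := PySem.Set.ofList real_draw
  let hits : List Int := PySem.List.sorted (tickets.map (fun t => pvHitB rd_set t)) (fun x => x) false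
  let n := hits.length
  let atLeast : Int → Int := fun k => (n : Int) - (pvSearch hits k n 0 n : Int)
  [("ge3", atLeast 3), ("ge4", atLeast 4), ("ge5", atLeast 5),
   ("ge2", atLeast 2), ("total_hits", hits.sum)]

-- ===== PRECONDITION & SPEC =====
def Spec_hit_summary_py (real_draw : List Int) (tickets : List (List Int)) (out : List (String × Int)) : Prop := out = hit_summary_py_alt real_draw tickets
instance (real_draw : List Int) (tickets : List (List Int)) (out : List (String × Int)) : Decidable (Spec_hit_summary_py real_draw tickets out) := by unfold Spec_hit_summary_py; infer_instance

-- ===== CLAIM (what is proved, stated in full; the proofs are below) =====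
def Claim_equal_hit_summary_py : Prop := ∀ (real_draw : List Int) (tickets : List (List Int)), Dom_hit_summary_py real_draw tickets → Spec_hit_summary_py real_draw tickets (hit_summary_py real_draw tickets)

-- ===== LEMMAS AND PROOFS =====

-- B's set comprehension has the same size as A's set intersection
theorem pvHitB_eq (rd : PySem.Set Int) (t : List Int) : pvHitB rd t = pvHit rd t := by
  unfold pvHitB pvHit PySem.Set.len
  have hperm : (PySem.Set.ofList (t.filter (fun x => PySem.Set.contains rd x))).Perm
      (PySem.Set.inter (PySem.Set.ofList t) rd) := by
    refine (List.perm_ext_iff_of_nodup (PySem.Set.nodup_ofList _)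
      (PySem.Set.nodup_inter _ _ (PySem.Set.nodup_ofList t))).2 ?_
    intro y
    rw [PySem.Set.mem_ofList, PySem.Set.mem_inter, List.mem_filter, PySem.Set.mem_ofList]
    simp
  exact congrArg Int.ofNat hperm.length_eq

-- Source B's while loop IS CPython's bisect_left loop, step for step
theorem pvSearch_eq (hits : List Int) (k : Int) (fuel lo hi : Nat) :
    pvSearch hits k fuel lo hi = PySem.List.bisectLeftLoop hits k fuel lo hi := by
  induction fuel generalizing lo hi with
  | zero => rfl
  | succ fuel ih =>
      rw [pvSearch, PySem.List.bisectLeftLoop]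
      split_ifs
      · cases hits[(lo + hi) / 2]? with
        | none => rfl
        | some y => by_cases hy : y < k <;> simp [hy, ih]
      · rfl

-- on a sorted list, length - bisectLeft k counts the elements ≥ k
theorem pvCountGe (l : List Int) (hp : l.Pairwise (· ≤ ·)) (k : Int) :
    ((l.length : Int) - (PySem.List.bisectLeft l k : Int)) = (l.countP (fun h => k ≤ h) : Int) := by
  obtain ⟨hle, hlt, hge⟩ := PySem.List.bisectLeft_spec l k hp
  set i := PySem.List.bisectLeft l k with hi
  have hsplit : l = l.take i ++ l.drop i := (List.take_append_drop i l).symm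
  have h1 : (l.take i).countP (fun h => k ≤ h) = 0 := by
    rw [List.countP_eq_zero]
    intro x hx
    obtain ⟨j, hj, hxe⟩ := List.mem_iff_getElem.1 hx
    simp only [List.length_take, lt_min_iff] at hj
    have hlt' := hlt j hj.2 hj.1
    rw [List.getElem_take] at hxe
    simp only [← hxe, decide_eq_true_eq]
    omega
  have h2 : (l.drop i).countP (fun h => k ≤ h) = l.length - i := by
    have := List.countP_eq_length (p := fun h => decide (k ≤ h)) (l := l.drop i)
    rw [this.2, List.length_drop]
    intro x hx
    obtain ⟨j, hj, hxe⟩ := List.mem_iff_getElem.1 hx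
    rw [List.length_drop] at hj
    have hjlen : i + j < l.length := by omega
    have := hge (i + j) hjlen (by omega)
    rw [List.getElem_drop] at hxe
    simp only [← hxe, decide_eq_true_eq]
    exact this
  have : l.countP (fun h => k ≤ h) = l.length - i := by
    conv_lhs => rw [hsplit]
    rw [List.countP_append, h1, h2]
    omega
  rw [this]
  omega

-- A's fold splits into the counter fold on the dict and the sum on the accumulator
theorem pvAFold (rd : PySem.Set Int) (ts : List (List Int)) (d : PySem.Dict Int Int) (acc : Int) :
    ts.foldl (fun (p : PySem.Dict Int Int × Int) t =>
        (p.1.insert (pvHit rd t) (p.1.getD (pvHit rd t) 0 + 1), p.2 + pvHit rd t)) (d, acc)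
      = ((ts.map (pvHit rd)).foldl (fun d h => d.insert h (d.getD h 0 + 1)) d,
         acc + ((ts.map (pvHit rd)).sum)) := by
  induction ts generalizing d acc with
  | nil => simp
  | cons t ts ih => simp [ih]; ring

-- summing counts of the distinct keys ≥ k recovers the threshold count
theorem pvSumCount (L : List Int) (hL : L.Nodup) (p : Int → Bool) (hs : List Int)
    (hsub : ∀ h ∈ hs, h ∈ L) :
    ((L.filter p).map (fun x => (hs.count x : Int))).sum = (hs.countP p : Int) := by
  induction hs with
  | nil => simp
  | cons h hs ih =>
      have hmem := hsub h (by simp)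
      have hsub' : ∀ x ∈ hs, x ∈ L := fun x hx => hsub x (by simp [hx])
      have base := ih hsub'
      by_cases hp : p h = true
      · have hf : h ∈ L.filter p := List.mem_filter.2 ⟨hmem, hp⟩
        have hnd : (L.filter p).Nodup := hL.filter p
        have hcount : ∀ x ∈ L.filter p,
            ((h :: hs).count x : Int) = (hs.count x : Int) + (if x = h then 1 else 0) := by
          intro x _
          by_cases hxh : x = h
          · subst hxh; simp
          · simp [Ne.symm hxh, hxh]
        calc ((L.filter p).map (fun x => ((h :: hs).count x : Int))).sum
            = ((L.filter p).map (fun x => (hs.count x : Int) + (if x = h then 1 else 0))).sum := by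
              apply congrArg List.sum
              exact List.map_congr_left hcount
          _ = ((L.filter p).map (fun x => (hs.count x : Int))).sum
                + ((L.filter p).map (fun x => (if x = h then 1 else 0 : Int))).sum := by
              rw [← List.sum_map_add]
          _ = (hs.countP p : Int) + 1 := by
              rw [base]
              congr 1
              have hind : ((L.filter p).map (fun x => (if x = h then (1:Int) else 0))).sum
                  = (((L.filter p).countP (fun x => decide (x = h))) : Int) := by
                simpa using PySem.List.sum_map_ite_one_zero (fun x => decide (x = h)) (L.filter p)
              rw [hind]
              have hc : (L.filter p).countP (fun x => decide (x = h)) = (L.filter p).count h := by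
                rw [List.count_eq_countP]
                exact List.countP_congr (fun a _ => by simp)
              rw [hc, List.count_eq_one_of_mem hnd hf]
              simp
          _ = ((h :: hs).countP p : Int) := by simp [hp]
      · have hcount : ∀ x ∈ L.filter p,
            ((h :: hs).count x : Int) = (hs.count x : Int) := by
          intro x hx
          have hne : x ≠ h := by
            rintro rfl
            exact hp (List.mem_filter.1 hx).2
          simp [Ne.symm hne]
        calc ((L.filter p).map (fun x => ((h :: hs).count x : Int))).sum
            = ((L.filter p).map (fun x => (hs.count x : Int))).sum := by
              apply congrArg List.sum; exact List.map_congr_left hcount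
          _ = (hs.countP p : Int) := base
          _ = ((h :: hs).countP p : Int) := by simp [hp]

-- one "ge k" entry of A equals the threshold count of the hit list
theorem pvComp (hits : List Int) (k : Int) :
    ((((hits.foldl (fun d h => d.insert h (d.getD h 0 + 1))
        (PySem.Dict.ofList [((0:Int),(0:Int)),(1,0),(2,0),(3,0),(4,0),(5,0),(6,0)])).items).filter
        (fun kv => k ≤ kv.1)).map (·.2)).sum = (hits.countP (fun h => k ≤ h) : Int) := by
  set d0 : PySem.Dict Int Int := PySem.Dict.ofList [((0:Int),(0:Int)),(1,0),(2,0),(3,0),(4,0),(5,0),(6,0)] with hd0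
  set counts := hits.foldl (fun d h => d.insert h (d.getD h 0 + 1)) d0 with hcounts
  have hnd0 : d0.keys.Nodup := by rw [hd0]; decide
  have hnd : counts.keys.Nodup := by
    rw [hcounts]; exact PySem.Dict.nodup_keys_foldl_insert hits _ d0 hnd0
  have hd0get : ∀ x : Int, d0.getD x 0 = 0 := by
    intro x
    have h : d0 = PySem.Dict.mk [(0,0),(1,0),(2,0),(3,0),(4,0),(5,0),(6,0)] := by rw [hd0]; decide
    rw [h, PySem.Dict.getD_eq_get?_getD]
    simp only [PySem.Dict.get?_mk_cons]
    split_ifs <;> rfl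
  have hget : ∀ x : Int, counts.getD x 0 = (hits.count x : Int) := by
    intro x
    rw [hcounts, PySem.Dict.getD_foldl_insert_add_one, hd0get]
    simp
  have hsub : ∀ h ∈ hits, h ∈ counts.keys := by
    intro h hh
    rw [hcounts, PySem.Dict.keys_foldl_insert]
    exact (PySem.Set.mem_update _ _ _).2 (Or.inr hh)
  rw [PySem.Dict.items_eq_map_keys counts hnd 0]
  have hfm : ((counts.keys.map (fun x => (x, counts.getD x 0))).filter (fun kv => k ≤ kv.1))
      = (counts.keys.filter (fun x => k ≤ x)).map (fun x => (x, counts.getD x 0)) := by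
    simp [List.filter_map]; rfl
  rw [hfm, List.map_map]
  have hmc : ((counts.keys.filter (fun x => k ≤ x)).map
        ((fun kv : Int × Int => kv.2) ∘ fun x => (x, counts.getD x 0)))
      = (counts.keys.filter (fun x => k ≤ x)).map (fun x => (hits.count x : Int)) :=
    List.map_congr_left (fun x _ => hget x)
  rw [hmc]
  exact pvSumCount counts.keys hnd (fun x => k ≤ x) hits hsub

-- one "ge k" entry of B equals the same threshold count
theorem pvBEntry (hitsA : List Int) (k : Int) :
    (((PySem.List.sorted hitsA (fun x => x) false).length : Int)
      - (pvSearch (PySem.List.sorted hitsA (fun x => x) false) k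
          (PySem.List.sorted hitsA (fun x => x) false).length 0
          (PySem.List.sorted hitsA (fun x => x) false).length : Int))
      = (hitsA.countP (fun h => k ≤ h) : Int) := by
  set s := PySem.List.sorted hitsA (fun x => x) false with hs
  have hp : s.Pairwise (· ≤ ·) := by
    simpa using PySem.List.sorted_pairwise hitsA (fun x => x)
  have hperm : s.Perm hitsA := PySem.List.sorted_perm hitsA (fun x => x) false
  rw [pvSearch_eq]
  have : PySem.List.bisectLeftLoop s k s.length 0 s.length = PySem.List.bisectLeft s k := rfl
  rw [this, pvCountGe s hp k, hperm.countP_eq]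

-- ===== VERDICT (by name: the statement is the Claim_ definition above) =====
theorem hit_summary_py_spec : Claim_equal_hit_summary_py := by
  intro rd ts _
  show hit_summary_py rd ts = hit_summary_py_alt rd ts
  simp only [hit_summary_py, hit_summary_py_alt]
  have hmap : ts.map (fun t => pvHitB (PySem.Set.ofList rd) t) = ts.map (pvHit (PySem.Set.ofList rd)) :=
    List.map_congr_left (fun t _ => pvHitB_eq _ t)
  rw [hmap, pvAFold]
  simp only [zero_add]
  rw [pvComp, pvComp, pvComp, pvComp, pvBEntry, pvBEntry, pvBEntry, pvBEntry,
    (PySem.List.sorted_perm (ts.map (pvHit (PySem.Set.ofList rd))) (fun x => x) false).sum_eq]
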